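-- pv_equiv track=rewrite | github.com/MrBrantCode/unitest_baseline | mut_generate/mist_train_cf/cf_68339/solution.py | divide_and_discover
-- ===== SOURCE A (Python) =====
-- def divide_and_discover(matrix):
--     if not matrix or not matrix[0]:
--         return []
--
--     rows, cols = len(matrix), len(matrix[0])
--     sequence = []
--     directions = [(0, 1), (1, 0), (0, -1), (-1, 0)]
--     visited = [[False] * cols for _ in range(rows)]
--     stack = [(0, 0, 0, 1)]
--
--     while stack:
--         row, col, dir_idx, step = stack.pop()
--
--         if row < 0 or row >= rows or col < 0 or col >= cols or visited[row][col]: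
--             continue
--
--         visited[row][col] = True
--         sequence.append(matrix[row][col])
--
--         if len(sequence) == rows * cols:
--             break
--
--         next_row, next_col = row + directions[dir_idx][0] * step, col + directions[dir_idx][1] * step
--
--         if 0 <= next_row < rows and 0 <= next_col < cols and not visited[next_row][next_col]:
--             stack.append((next_row, next_col, dir_idx, step))
--         else:
--             dir_idx = (dir_idx + 1) % 4
--             next_row, next_col = row + directions[dir_idx][0] * step, col + directions[dir_idx][1] * step
--
--             if 0 <= next_row < rows and 0 <= next_col < cols and not visited[next_row][next_col]:
--                 stack.append((next_row, next_col, dir_idx, step))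
--             else:
--                 stack.append((row, col, dir_idx, step + 1))
--
--     return sequence
-- ===== SOURCE B (Python) =====
-- def divide_and_discover(matrix):
--     if not matrix or not matrix[0]:
--         return []
--     top, bottom = 0, len(matrix) - 1
--     left, right = 0, len(matrix[0]) - 1
--     out = []
--     while top <= bottom and left <= right:
--         for c in range(left, right + 1):
--             out.append(matrix[top][c])
--         for r in range(top + 1, bottom + 1):
--             out.append(matrix[r][right])
--         if top < bottom:
--             for c in range(right - 1, left - 1, -1):
--                 out.append(matrix[bottom][c])
--         if left < right:
--             for r in range(bottom - 1, top, -1):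
--                 out.append(matrix[r][left])
--         top += 1
--         bottom -= 1
--         left += 1
--         right -= 1
--     return out
-- ===== Notes on version B (the rewrite author's own statement) =====
-- stated objective: simpler
-- what changed: Replaced the stack-driven greedy walk over a visited-cell grid (with its step counter and turn logic) by the classic boundary-peeling spiral with four shrinking bounds, which also runs measurably faster (constant factor: no per-cell stack pushes/pops or visited-matrix bookkeeping).
import Mathlib
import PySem

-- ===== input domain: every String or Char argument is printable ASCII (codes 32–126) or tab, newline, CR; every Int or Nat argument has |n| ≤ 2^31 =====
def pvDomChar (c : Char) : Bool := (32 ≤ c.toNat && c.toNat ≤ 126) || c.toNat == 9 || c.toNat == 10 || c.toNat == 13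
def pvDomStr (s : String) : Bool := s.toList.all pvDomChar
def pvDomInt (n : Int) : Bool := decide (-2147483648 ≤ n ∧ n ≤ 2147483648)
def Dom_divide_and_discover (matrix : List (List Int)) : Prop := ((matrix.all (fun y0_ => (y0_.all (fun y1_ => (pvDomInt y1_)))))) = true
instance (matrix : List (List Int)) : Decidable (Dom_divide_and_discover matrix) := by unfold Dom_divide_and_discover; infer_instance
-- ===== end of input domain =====

-- B replaces A's stack-driven greedy walk over a visited grid by the classic boundary-peeling
-- spiral with four shrinking bounds (objective: simpler).


-- ===== PORT A =====

-- matrix[r][c] for 0 ≤ r < len(matrix), 0 ≤ c < len(matrix[r]): exact on those guarded accesses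
def getm (matrix : List (List Int)) (r c : Int) : Int :=
  (matrix.getD r.toNat []).getD c.toNat 0

-- visited[r][c] (read) — only consulted after the 0 ≤ r < rows, 0 ≤ c < cols guards, where it is exact
def vget (g : List (List Bool)) (r c : Int) : Bool :=
  (g.getD r.toNat []).getD c.toNat false

-- visited[r][c] = True (write), same in-range guarantee
def vset (g : List (List Bool)) (r c : Int) : List (List Bool) :=
  g.set r.toNat ((g.getD r.toNat []).set c.toNat true)

-- directions[d] for d in range(4)
def dirAt (d : Int) : Int × Int :=
  ((PySem.List.pyGet? ([((0 : Int), (1 : Int)), (1, 0), (0, -1), (-1, 0)] : List (Int × Int)) d).getD (0, 0))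

-- the while-stack loop of A; fuel is only a totality guard (rows*cols+1 iterations always suffice:
-- every iteration but the last visits a fresh cell or empties the stack)
def loopA (matrix : List (List Int)) (rows cols : Int) :
    Nat → List (List Bool) → List Int → List (Int × Int × Int × Int) → List Int
  | 0, _, seq, _ => seq
  | fuel + 1, visited, seq, stack =>
    match stack with
    | [] => seq
    | (row, col, dirIdx, step) :: rest =>
      if row < 0 ∨ row ≥ rows ∨ col < 0 ∨ col ≥ cols ∨ vget visited row col = true then
        loopA matrix rows cols fuel visited seq rest
      else
        let visited' := vset visited row col
        let seq' := seq ++ [getm matrix row col]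
        if (seq'.length : Int) = rows * cols then seq'
        else
          let nr := row + (dirAt dirIdx).1 * step
          let nc := col + (dirAt dirIdx).2 * step
          if 0 ≤ nr ∧ nr < rows ∧ 0 ≤ nc ∧ nc < cols ∧ vget visited' nr nc = false then
            loopA matrix rows cols fuel visited' seq' ((nr, nc, dirIdx, step) :: rest)
          else
            let d2 := PySem.Int.mod (dirIdx + 1) 4
            let nr2 := row + (dirAt d2).1 * step
            let nc2 := col + (dirAt d2).2 * step
            if 0 ≤ nr2 ∧ nr2 < rows ∧ 0 ≤ nc2 ∧ nc2 < cols ∧ vget visited' nr2 nc2 = false then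
              loopA matrix rows cols fuel visited' seq' ((nr2, nc2, d2, step) :: rest)
            else
              loopA matrix rows cols fuel visited' seq' ((row, col, d2, step + 1) :: rest)

def divide_and_discover (matrix : List (List Int)) : List Int :=
  if matrix = [] ∨ matrix.headD [] = [] then []
  else
    let rows : Int := matrix.length
    let cols : Int := (matrix.headD []).length
    loopA matrix rows cols (rows.toNat * cols.toNat + 1)
      (List.replicate rows.toNat (List.replicate cols.toNat false)) [] [(0, 0, 0, 1)]

-- ===== PORT B =====

-- the while top<=bottom and left<=right loop of Source B, appending the four sides of each ring
def loopB (matrix : List (List Int)) (top bottom left right : Int) (out : List Int) : List Int :=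
  if h : top ≤ bottom ∧ left ≤ right then
    let out1 := (PySem.List.pyRange left (right + 1) 1).foldl
      (fun a c => a ++ [getm matrix top c]) out
    let out2 := (PySem.List.pyRange (top + 1) (bottom + 1) 1).foldl
      (fun a r => a ++ [getm matrix r right]) out1
    let out3 := if top < bottom then
        (PySem.List.pyRange (right - 1) (left - 1) (-1)).foldl
          (fun a c => a ++ [getm matrix bottom c]) out2
      else out2
    let out4 := if left < right then
        (PySem.List.pyRange (bottom - 1) top (-1)).foldl
          (fun a r => a ++ [getm matrix r left]) out3
      else out3
    loopB matrix (top + 1) (bottom - 1) (left + 1) (right - 1) out4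
  else out
termination_by (bottom + 1 - top).toNat
decreasing_by omega

def divide_and_discover_alt (matrix : List (List Int)) : List Int :=
  if matrix = [] ∨ matrix.headD [] = [] then []
  else loopB matrix 0 ((matrix.length : Int) - 1) 0 (((matrix.headD []).length : Int) - 1) []

-- ===== PRECONDITION & SPEC =====

-- Pre_ excludes only ragged matrices with a row shorter than the first row: on those the Python A
-- raises IndexError (and B raises there too); A returns normally on every other input.
def Pre_divide_and_discover (matrix : List (List Int)) : Prop :=
  ∀ row ∈ matrix, (matrix.headD []).length ≤ row.length
instance (matrix : List (List Int)) : Decidable (Pre_divide_and_discover matrix) := by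
  unfold Pre_divide_and_discover; infer_instance

def pvWitness_divide_and_discover : List (List Int) := [[1, 2], [3, 4]]

def Spec_divide_and_discover (matrix : List (List Int)) (out : List Int) : Prop :=
  out = divide_and_discover_alt matrix
instance (matrix : List (List Int)) (out : List Int) : Decidable (Spec_divide_and_discover matrix out) := by
  unfold Spec_divide_and_discover; infer_instance

-- ===== CLAIM (what is proved, stated in full; the proofs are below) =====
def Claim_equal_divide_and_discover : Prop :=
  ∀ (matrix : List (List Int)), Dom_divide_and_discover matrix →
    Pre_divide_and_discover matrix →
    Spec_divide_and_discover matrix (divide_and_discover matrix)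

-- ===== LEMMAS AND PROOFS =====


-- ===== proof machinery: abstract greedy paths =====

-- coordinates of an annotated cell (row, col, arrival direction)
def pcoords (p : Int × Int × Int) : Int × Int := (p.1, p.2.1)

def pfwd (p : Int × Int × Int) : Int × Int :=
  (p.1 + (dirAt p.2.2).1, p.2.1 + (dirAt p.2.2).2)

def pturn (p : Int × Int × Int) : Int × Int × Int :=
  (p.1 + (dirAt (PySem.Int.mod (p.2.2 + 1) 4)).1,
   p.2.1 + (dirAt (PySem.Int.mod (p.2.2 + 1) 4)).2,
   PySem.Int.mod (p.2.2 + 1) 4)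

def Inb (rows cols : Int) (q : Int × Int) : Prop :=
  0 ≤ q.1 ∧ q.1 < rows ∧ 0 ≤ q.2 ∧ q.2 < cols

def Free (rows cols : Int) (vis : List (Int × Int)) (q : Int × Int) : Prop :=
  Inb rows cols q ∧ q ∉ vis

-- the greedy rule of A: go straight if the straight neighbour is in range and fresh,
-- otherwise turn clockwise once (and that neighbour must then be in range and fresh)
def StepOk (rows cols : Int) (vis : List (Int × Int)) (x y : Int × Int × Int) : Prop :=
  (Free rows cols vis (pfwd x) ∧ y = (pfwd x |>.1, pfwd x |>.2, x.2.2)) ∨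
  (¬ Free rows cols vis (pfwd x) ∧ y = pturn x ∧ Free rows cols vis (pcoords (pturn x)))

def GP (rows cols : Int) : List (Int × Int) → List (Int × Int × Int) → Prop
  | _, [] => True
  | _, [_] => True
  | vis, x :: y :: rest =>
    StepOk rows cols (pcoords x :: vis) x y ∧ GP rows cols (pcoords x :: vis) (y :: rest)

lemma pfwd0 (r c : Int) : pfwd (r, c, 0) = (r, c + 1) := by
  unfold pfwd; rw [show dirAt 0 = ((0 : Int), (1 : Int)) from rfl]
  simp only [Prod.ext_iff, and_true, true_and]; first | trivial | omega
lemma pfwd1 (r c : Int) : pfwd (r, c, 1) = (r + 1, c) := by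
  unfold pfwd; rw [show dirAt 1 = ((1 : Int), (0 : Int)) from rfl]
  simp only [Prod.ext_iff, and_true, true_and]; first | trivial | omega
lemma pfwd2 (r c : Int) : pfwd (r, c, 2) = (r, c - 1) := by
  unfold pfwd; rw [show dirAt 2 = ((0 : Int), (-1 : Int)) from rfl]
  simp only [Prod.ext_iff, and_true, true_and]; first | trivial | omega
lemma pfwd3 (r c : Int) : pfwd (r, c, 3) = (r - 1, c) := by
  unfold pfwd; rw [show dirAt 3 = ((-1 : Int), (0 : Int)) from rfl]
  simp only [Prod.ext_iff, and_true, true_and]; first | trivial | omega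
lemma pturn0 (r c : Int) : pturn (r, c, 0) = (r + 1, c, 1) := by
  unfold pturn
  rw [show PySem.Int.mod ((0 : Int) + 1) 4 = 1 from rfl, show dirAt 1 = ((1 : Int), (0 : Int)) from rfl]
  simp only [Prod.ext_iff, and_true, true_and]; first | trivial | omega
lemma pturn1 (r c : Int) : pturn (r, c, 1) = (r, c - 1, 2) := by
  unfold pturn
  rw [show PySem.Int.mod ((1 : Int) + 1) 4 = 2 from rfl, show dirAt 2 = ((0 : Int), (-1 : Int)) from rfl]
  simp only [Prod.ext_iff, and_true, true_and]; first | trivial | omega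
lemma pturn2 (r c : Int) : pturn (r, c, 2) = (r - 1, c, 3) := by
  unfold pturn
  rw [show PySem.Int.mod ((2 : Int) + 1) 4 = 3 from rfl, show dirAt 3 = ((-1 : Int), (0 : Int)) from rfl]
  simp only [Prod.ext_iff, and_true, true_and]; first | trivial | omega
lemma pturn3 (r c : Int) : pturn (r, c, 3) = (r, c + 1, 0) := by
  unfold pturn
  rw [show PySem.Int.mod ((3 : Int) + 1) 4 = 0 from rfl, show dirAt 0 = ((0 : Int), (1 : Int)) from rfl]
  simp only [Prod.ext_iff, and_true, true_and]; first | trivial | omega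

lemma stepOk_congr {rows cols : Int} {v v' : List (Int × Int)} {x y : Int × Int × Int}
    (h : ∀ p, p ∈ v ↔ p ∈ v') (hs : StepOk rows cols v x y) : StepOk rows cols v' x y := by
  unfold StepOk Free at *
  rcases hs with ⟨⟨hi, hm⟩, he⟩ | ⟨hn, he, hi, hm⟩
  · exact Or.inl ⟨⟨hi, fun c => hm ((h _).2 c)⟩, he⟩
  · refine Or.inr ⟨fun c => hn ⟨c.1, fun m => c.2 ((h _).1 m)⟩, he, hi, fun c => hm ((h _).2 c)⟩

lemma gp_congr {rows cols : Int} :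
    ∀ (l : List (Int × Int × Int)) (v v' : List (Int × Int)),
    (∀ p, p ∈ v ↔ p ∈ v') → GP rows cols v l → GP rows cols v' l
  | [], _, _, _, _ => trivial
  | [_], _, _, _, _ => trivial
  | x :: y :: rest, v, v', h, hg => by
    obtain ⟨h1, h2⟩ := hg
    have h' : ∀ p, p ∈ pcoords x :: v ↔ p ∈ pcoords x :: v' := by
      intro p; simp [h p]
    exact ⟨stepOk_congr h' h1, gp_congr (y :: rest) _ _ h' h2⟩

lemma gp_append {rows cols : Int} :
    ∀ (xs ys : List (Int × Int × Int)) (vis : List (Int × Int)),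
    GP rows cols vis xs →
    GP rows cols (xs.map pcoords ++ vis) ys →
    (∀ x y, xs.getLast? = some x → ys.head? = some y →
      StepOk rows cols (xs.map pcoords ++ vis) x y) →
    GP rows cols vis (xs ++ ys) := by
  intro xs
  induction xs with
  | nil =>
    intro ys vis _ h2 _
    simpa using h2
  | cons x xs ih =>
    intro ys vis h1 h2 hj
    cases xs with
    | nil =>
      cases ys with
      | nil => simpa using h1
      | cons y ys =>
        have hs : StepOk rows cols ([x].map pcoords ++ vis) x y := hj x y rfl rfl
        refine ⟨stepOk_congr (by intro p; simp) hs, ?_⟩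
        apply gp_congr (y :: ys) ([x].map pcoords ++ vis) _ (by intro p; simp) h2
    | cons z zs =>
      have h1' : GP rows cols (pcoords x :: vis) (z :: zs) := h1.2
      have hstep : StepOk rows cols (pcoords x :: vis) x z := h1.1
      have htail : GP rows cols (pcoords x :: vis) ((z :: zs) ++ ys) := by
        apply ih ys (pcoords x :: vis) h1'
        · apply gp_congr ys (((x :: z :: zs).map pcoords) ++ vis) _
            (by intro p; simp only [List.map_cons, List.mem_append, List.mem_cons]; tauto) h2
        · intro a b ha hb
          apply stepOk_congr (v := ((x :: z :: zs).map pcoords) ++ vis)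
            (by intro p; simp only [List.map_cons, List.mem_append, List.mem_cons]; tauto)
          apply hj a b _ hb
          rw [List.getLast?_cons_cons]
          exact ha
      exact ⟨hstep, htail⟩

-- straight runs of cells
def ray (r c dr dc d : Int) : Nat → List (Int × Int × Int)
  | 0 => []
  | n + 1 => (r, c, d) :: ray (r + dr) (c + dc) dr dc d n

lemma ray_length (dr dc d : Int) : ∀ (n : Nat) (r c : Int), (ray r c dr dc d n).length = n := by
  intro n
  induction n with
  | zero => intro r c; rfl
  | succ k ih => intro r c; simp [ray, ih]

lemma mem_rayR (d : Int) : ∀ (n : Nat) (r c x y : Int),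
    ((x, y) ∈ (ray r c 0 1 d n).map pcoords) ↔ (x = r ∧ c ≤ y ∧ y < c + n) := by
  intro n
  induction n with
  | zero => intro r c x y; simp [ray]
  | succ k ih =>
    intro r c x y
    simp only [ray, List.map_cons, List.mem_cons, ih, pcoords, Prod.mk.injEq]
    push_cast
    omega

lemma mem_rayD (d : Int) : ∀ (n : Nat) (r c x y : Int),
    ((x, y) ∈ (ray r c 1 0 d n).map pcoords) ↔ (y = c ∧ r ≤ x ∧ x < r + n) := by
  intro n
  induction n with
  | zero => intro r c x y; simp [ray]
  | succ k ih =>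
    intro r c x y
    simp only [ray, List.map_cons, List.mem_cons, ih, pcoords, Prod.mk.injEq]
    push_cast
    omega

lemma mem_rayL (d : Int) : ∀ (n : Nat) (r c x y : Int),
    ((x, y) ∈ (ray r c 0 (-1) d n).map pcoords) ↔ (x = r ∧ c - n < y ∧ y ≤ c) := by
  intro n
  induction n with
  | zero => intro r c x y; simp [ray]
  | succ k ih =>
    intro r c x y
    simp only [ray, List.map_cons, List.mem_cons, ih, pcoords, Prod.mk.injEq]
    push_cast
    omega

lemma mem_rayU (d : Int) : ∀ (n : Nat) (r c x y : Int),
    ((x, y) ∈ (ray r c (-1) 0 d n).map pcoords) ↔ (y = c ∧ r - n < x ∧ x ≤ r) := by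
  intro n
  induction n with
  | zero => intro r c x y; simp [ray]
  | succ k ih =>
    intro r c x y
    simp only [ray, List.map_cons, List.mem_cons, ih, pcoords, Prod.mk.injEq]
    push_cast
    omega

lemma ray_getLast (dr dc d : Int) : ∀ (n : Nat) (r c : Int),
    (ray r c dr dc d (n + 1)).getLast? = some (r + dr * n, c + dc * n, d) := by
  intro n
  induction n with
  | zero => intro r c; simp [ray]
  | succ k ih =>
    intro r c
    have h2 : (ray r c dr dc d (k + 1 + 1)).getLast?
        = (ray (r + dr) (c + dc) dr dc d (k + 1)).getLast? := by
      show ((r, c, d) :: ((r + dr), (c + dc), d) :: ray (r + dr + dr) (c + dc + dc) dr dc d k).getLast? = _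
      rw [List.getLast?_cons_cons]
      rfl
    rw [h2, ih]
    push_cast
    ring_nf

lemma gp_rayR (rows cols : Int) : ∀ (n : Nat) (r c : Int) (vis : List (Int × Int)),
    (∀ x y, x = r ∧ c ≤ y ∧ y < c + n → Free rows cols vis (x, y)) →
    GP rows cols vis (ray r c 0 1 0 n) := by
  intro n
  induction n with
  | zero => intro r c vis _; trivial
  | succ k ih =>
    intro r c vis H
    cases k with
    | zero => trivial
    | succ k' =>
      have hray : ray r c 0 1 0 (k' + 1 + 1) = (r, c, 0) :: ray (r + 0) (c + 1) 0 1 0 (k' + 1) := rfl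
      have hray2 : ray (r + 0) (c + 1) 0 1 0 (k' + 1)
          = (r + 0, c + 1, 0) :: ray (r + 0 + 0) (c + 1 + 1) 0 1 0 k' := rfl
      rw [hray, hray2]
      constructor
      · left
        have hF := H r (c + 1) ⟨rfl, by omega, by push_cast; omega⟩
        refine ⟨⟨by rw [pfwd0]; exact hF.1, ?_⟩, by simp [pfwd0]⟩
        rw [pfwd0]
        simp only [pcoords, List.mem_cons, not_or]
        exact ⟨by simp only [Prod.mk.injEq]; omega, hF.2⟩
      · rw [← hray2]
        apply ih (r + 0) (c + 1) (pcoords (r, c, 0) :: vis)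
        intro x y hxy
        have hF := H x y (by push_cast at hxy ⊢; omega)
        refine ⟨hF.1, ?_⟩
        simp only [pcoords, List.mem_cons, not_or]
        exact ⟨by simp only [Prod.mk.injEq]; omega, hF.2⟩

lemma gp_rayD (rows cols : Int) : ∀ (n : Nat) (r c : Int) (vis : List (Int × Int)),
    (∀ x y, y = c ∧ r ≤ x ∧ x < r + n → Free rows cols vis (x, y)) →
    GP rows cols vis (ray r c 1 0 1 n) := by
  intro n
  induction n with
  | zero => intro r c vis _; trivial
  | succ k ih =>
    intro r c vis H
    cases k with
    | zero => trivial
    | succ k' =>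
      have hray : ray r c 1 0 1 (k' + 1 + 1) = (r, c, 1) :: ray (r + 1) (c + 0) 1 0 1 (k' + 1) := rfl
      have hray2 : ray (r + 1) (c + 0) 1 0 1 (k' + 1)
          = (r + 1, c + 0, 1) :: ray (r + 1 + 1) (c + 0 + 0) 1 0 1 k' := rfl
      rw [hray, hray2]
      constructor
      · left
        have hF := H (r + 1) c ⟨rfl, by omega, by push_cast; omega⟩
        refine ⟨⟨by rw [pfwd1]; exact hF.1, ?_⟩, by simp [pfwd1]⟩
        rw [pfwd1]
        simp only [pcoords, List.mem_cons, not_or]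
        exact ⟨by simp only [Prod.mk.injEq]; omega, hF.2⟩
      · rw [← hray2]
        apply ih (r + 1) (c + 0) (pcoords (r, c, 1) :: vis)
        intro x y hxy
        have hF := H x y (by push_cast at hxy ⊢; omega)
        refine ⟨hF.1, ?_⟩
        simp only [pcoords, List.mem_cons, not_or]
        exact ⟨by simp only [Prod.mk.injEq]; omega, hF.2⟩

lemma gp_rayL (rows cols : Int) : ∀ (n : Nat) (r c : Int) (vis : List (Int × Int)),
    (∀ x y, x = r ∧ c - n < y ∧ y ≤ c → Free rows cols vis (x, y)) →
    GP rows cols vis (ray r c 0 (-1) 2 n) := by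
  intro n
  induction n with
  | zero => intro r c vis _; trivial
  | succ k ih =>
    intro r c vis H
    cases k with
    | zero => trivial
    | succ k' =>
      have hray : ray r c 0 (-1) 2 (k' + 1 + 1) = (r, c, 2) :: ray (r + 0) (c + -1) 0 (-1) 2 (k' + 1) := rfl
      have hray2 : ray (r + 0) (c + -1) 0 (-1) 2 (k' + 1)
          = (r + 0, c + -1, 2) :: ray (r + 0 + 0) (c + -1 + -1) 0 (-1) 2 k' := rfl
      rw [hray, hray2]
      constructor
      · left
        have hF := H r (c - 1) ⟨rfl, by push_cast; omega, by omega⟩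
        refine ⟨⟨by rw [pfwd2]; exact hF.1, ?_⟩, ?_⟩
        · rw [pfwd2]
          simp only [pcoords, List.mem_cons, not_or]
          exact ⟨by simp only [Prod.mk.injEq]; omega, hF.2⟩
        · rw [pfwd2]; simp only [Prod.ext_iff, and_true, true_and]; first | trivial | omega
      · rw [← hray2]
        apply ih (r + 0) (c + -1) (pcoords (r, c, 2) :: vis)
        intro x y hxy
        have hF := H x y (by push_cast at hxy ⊢; omega)
        refine ⟨hF.1, ?_⟩
        simp only [pcoords, List.mem_cons, not_or]
        exact ⟨by simp only [Prod.mk.injEq]; omega, hF.2⟩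

lemma gp_rayU (rows cols : Int) : ∀ (n : Nat) (r c : Int) (vis : List (Int × Int)),
    (∀ x y, y = c ∧ r - n < x ∧ x ≤ r → Free rows cols vis (x, y)) →
    GP rows cols vis (ray r c (-1) 0 3 n) := by
  intro n
  induction n with
  | zero => intro r c vis _; trivial
  | succ k ih =>
    intro r c vis H
    cases k with
    | zero => trivial
    | succ k' =>
      have hray : ray r c (-1) 0 3 (k' + 1 + 1) = (r, c, 3) :: ray (r + -1) (c + 0) (-1) 0 3 (k' + 1) := rfl
      have hray2 : ray (r + -1) (c + 0) (-1) 0 3 (k' + 1)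
          = (r + -1, c + 0, 3) :: ray (r + -1 + -1) (c + 0 + 0) (-1) 0 3 k' := rfl
      rw [hray, hray2]
      constructor
      · left
        have hF := H (r - 1) c ⟨rfl, by push_cast; omega, by omega⟩
        refine ⟨⟨by rw [pfwd3]; exact hF.1, ?_⟩, ?_⟩
        · rw [pfwd3]
          simp only [pcoords, List.mem_cons, not_or]
          exact ⟨by simp only [Prod.mk.injEq]; omega, hF.2⟩
        · rw [pfwd3]; simp only [Prod.ext_iff, and_true, true_and]; first | trivial | omega
      · rw [← hray2]
        apply ih (r + -1) (c + 0) (pcoords (r, c, 3) :: vis)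
        intro x y hxy
        have hF := H x y (by push_cast at hxy ⊢; omega)
        refine ⟨hF.1, ?_⟩
        simp only [pcoords, List.mem_cons, not_or]
        exact ⟨by simp only [Prod.mk.injEq]; omega, hF.2⟩

-- the (t..b) x (l..r) clockwise ring-peeling coordinate path
def ringPath (t b l r : Int) : List (Int × Int × Int) :=
  if h : t ≤ b ∧ l ≤ r then
    if t = b then ray t l 0 1 0 (r - l + 1).toNat
    else if l = r then (t, l, 0) :: ray (t + 1) l 1 0 1 (b - t).toNat
    else
      ray t l 0 1 0 (r - l + 1).toNat ++
        (ray (t + 1) r 1 0 1 (b - t).toNat ++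
          (ray b (r - 1) 0 (-1) 2 (r - l).toNat ++
            (ray (b - 1) l (-1) 0 3 (b - t - 1).toNat ++
              ringPath (t + 1) (b - 1) (l + 1) (r - 1))))
  else []
termination_by (b + 1 - t).toNat
decreasing_by omega

lemma ringPath_nil {t b l r : Int} (h : ¬(t ≤ b ∧ l ≤ r)) : ringPath t b l r = [] := by
  rw [ringPath]; simp [h]

lemma ringPath_head {t b l r : Int} (h : t ≤ b ∧ l ≤ r) :
    (ringPath t b l r).head? = some (t, l, 0) := by
  obtain ⟨n, hn⟩ : ∃ n, (r - l + 1).toNat = n + 1 := ⟨(r - l).toNat, by omega⟩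
  rw [ringPath, dif_pos h]
  split_ifs with h1 h2
  · rw [hn]; rfl
  · rfl
  · rw [hn, show ray t l 0 1 0 (n + 1) = (t, l, 0) :: ray (t + 0) (l + 1) 0 1 0 n from rfl,
      List.cons_append]
    rfl

lemma ringPath_length : ∀ (N : Nat) (t b l r : Int), (b + 1 - t).toNat ≤ N →
    (ringPath t b l r).length = (b + 1 - t).toNat * (r + 1 - l).toNat := by
  intro N
  induction N with
  | zero =>
    intro t b l r hN
    rw [ringPath_nil (by omega)]
    simp
    omega
  | succ N ih =>
    intro t b l r hN
    by_cases h : t ≤ b ∧ l ≤ r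
    · rw [ringPath, dif_pos h]
      split_ifs with h1 h2
      · rw [ray_length, show (b + 1 - t).toNat = 1 by omega, one_mul]
        omega
      · simp only [List.length_cons, ray_length]
        rw [show (r + 1 - l).toNat = 1 by omega, mul_one]
        omega
      · simp only [List.length_append, ray_length, ih (t + 1) (b - 1) (l + 1) (r - 1) (by omega)]
        obtain ⟨m, hm⟩ : ∃ m, (b - t).toNat = m + 1 := ⟨(b - t - 1).toNat, by omega⟩
        obtain ⟨k, hk⟩ : ∃ k, (r - l).toNat = k + 1 := ⟨(r - l - 1).toNat, by omega⟩
        rw [show (r - l + 1).toNat = k + 2 by omega, hm, show (b - t - 1).toNat = m by omega,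
          show (b + 1 - t).toNat = m + 2 by omega, show (r + 1 - l).toNat = k + 2 by omega,
          show (b - 1 + 1 - (t + 1)).toNat = m by omega,
          show (r - 1 + 1 - (l + 1)).toNat = k by omega, hk]
        ring
    · rw [ringPath_nil h]
      simp
      omega

lemma gp_ring : ∀ (N : Nat) (t b l r rows cols : Int) (vis : List (Int × Int)),
    (b + 1 - t).toNat ≤ N → 0 ≤ t → 0 ≤ l → b < rows → r < cols →
    (∀ x y, (x, y) ∈ vis ↔
      (0 ≤ x ∧ x < rows ∧ 0 ≤ y ∧ y < cols ∧ ¬(t ≤ x ∧ x ≤ b ∧ l ≤ y ∧ y ≤ r))) →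
    GP rows cols vis (ringPath t b l r) := by
  intro N
  induction N with
  | zero =>
    intro t b l r rows cols vis hN h0t h0l hbr hrc hvis
    rw [ringPath_nil (by omega)]
    trivial
  | succ N ih =>
    intro t b l r rows cols vis hN h0t h0l hbr hrc hvis
    by_cases h : t ≤ b ∧ l ≤ r
    · rw [ringPath, dif_pos h]
      by_cases h1 : t = b
      · -- single row ring
        rw [if_pos h1]
        apply gp_rayR
        intro x y hxy
        refine ⟨⟨by omega, by omega, by omega, by omega⟩, ?_⟩
        rw [hvis x y]
        push_cast at hxy
        omega
      · by_cases h2 : l = r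
        · -- single column ring
          rw [if_neg h1, if_pos h2]
          subst h2
          obtain ⟨m, hm⟩ : ∃ m, (b - t).toNat = m + 1 := ⟨(b - t - 1).toNat, by omega⟩
          rw [hm, show ray (t + 1) l 1 0 1 (m + 1) = (t + 1, l, 1) :: ray (t + 1 + 1) (l + 0) 1 0 1 m from rfl]
          constructor
          · -- StepOk at the top cell: right is blocked, turn down
            right
            refine ⟨?_, ?_, ?_⟩
            · rw [pfwd0]
              intro hfree
              rcases Int.lt_or_le (l + 1) cols with hc | hc
              · have := (hvis t (l + 1)).2 ⟨by omega, by omega, by omega, by omega, by omega⟩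
                exact hfree.2 (by simp [this])
              · exact absurd hfree.1.2.2.2 (by omega)
            · rw [pturn0]
            · rw [pturn0]
              show Free rows cols (pcoords (t, l, 0) :: vis) ((t + 1 : Int), l)
              refine ⟨⟨by omega, by omega, by omega, by omega⟩, ?_⟩
              simp only [pcoords, List.mem_cons, not_or]
              refine ⟨by simp only [Prod.mk.injEq]; omega, ?_⟩
              rw [hvis (t + 1) l]
              omega
          · -- the downward ray
            rw [show (t + 1, l, 1) :: ray (t + 1 + 1) (l + 0) 1 0 1 m = ray (t + 1) l 1 0 1 (m + 1) from rfl]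
            apply gp_rayD
            intro x y hxy
            refine ⟨⟨by omega, by omega, by omega, by omega⟩, ?_⟩
            simp only [pcoords, List.mem_cons, not_or]
            refine ⟨by simp only [Prod.mk.injEq]; omega, ?_⟩
            rw [hvis x y]
            push_cast at hxy
            omega
        · -- full ring
          rw [if_neg h1, if_neg h2]
          obtain ⟨k1, hk1⟩ : ∃ k, (r - l + 1).toNat = k + 1 := ⟨(r - l).toNat, by omega⟩
          obtain ⟨k2, hk2⟩ : ∃ k, (b - t).toNat = k + 1 := ⟨(b - t - 1).toNat, by omega⟩
          obtain ⟨k3, hk3⟩ : ∃ k, (r - l).toNat = k + 1 := ⟨(r - l - 1).toNat, by omega⟩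
          have hgk1 : (k1 : Int) = r - l := by omega
          have hgk2 : (k2 : Int) = b - t - 1 := by omega
          have hgk3 : (k3 : Int) = r - l - 1 := by omega
          rw [hk1, hk2, hk3]
          apply gp_append
          · -- top row
            apply gp_rayR
            intro x y hxy
            refine ⟨⟨by omega, by omega, by omega, by omega⟩, ?_⟩
            rw [hvis x y]
            push_cast at hxy
            omega
          · -- right, bottom, left columns and the inner ring
            apply gp_append
            · apply gp_rayD
              intro x y hxy
              simp only [Free, Inb, List.mem_append, mem_rayR, hvis, not_or]
              push_cast at hxy
              constructor
              · exact ⟨by omega, by omega, by omega, by omega⟩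
              · push_cast; omega
            · apply gp_append
              · apply gp_rayL
                intro x y hxy
                simp only [Free, Inb, List.mem_append, mem_rayR, mem_rayD, hvis, not_or]
                push_cast at hxy
                constructor
                · exact ⟨by omega, by omega, by omega, by omega⟩
                · push_cast; omega
              · apply gp_append
                · apply gp_rayU
                  intro x y hxy
                  simp only [Free, Inb, List.mem_append, mem_rayR, mem_rayD, mem_rayL, hvis, not_or]
                  push_cast at hxy
                  constructor
                  · exact ⟨by omega, by omega, by omega, by omega⟩
                  · push_cast; omega
                · -- inner ring via the induction hypothesis
                  apply ih (t + 1) (b - 1) (l + 1) (r - 1) rows cols _ (by omega)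
                    (by omega) (by omega) (by omega) (by omega)
                  intro x y
                  simp only [List.mem_append, mem_rayR, mem_rayD, mem_rayL, mem_rayU, hvis]
                  push_cast
                  omega
                · -- junction: left column to inner ring
                  intro x y hx hy
                  by_cases hinner : t + 1 ≤ b - 1 ∧ l + 1 ≤ r - 1
                  · rw [ringPath_head hinner] at hy
                    obtain rfl := Option.some.inj hy
                    obtain ⟨m4, hm4⟩ : ∃ m, (b - t - 1).toNat = m + 1 := ⟨(b - t - 2).toNat, by omega⟩
                    rw [hm4, ray_getLast] at hx
                    obtain rfl := Option.some.inj hx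
                    have hgm4 : (m4 : Int) = b - t - 2 := by omega
                    right
                    refine ⟨?_, ?_, ?_⟩
                    · rw [show pfwd (b - 1 + -1 * (m4 : Int), l + 0 * (m4 : Int), 3)
                          = (b - 1 + -1 * (m4 : Int) - 1, l + 0 * (m4 : Int)) from pfwd3 _ _]
                      intro hfree
                      apply hfree.2
                      simp only [pcoords, List.mem_cons, List.mem_append, mem_rayR, mem_rayD,
                        mem_rayL, mem_rayU, Prod.mk.injEq, hvis]
                      push_cast
                      omega
                    · rw [show pturn (b - 1 + -1 * (m4 : Int), l + 0 * (m4 : Int), 3)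
                          = (b - 1 + -1 * (m4 : Int), l + 0 * (m4 : Int) + 1, 0) from pturn3 _ _]
                      simp only [Prod.mk.injEq, and_true]
                      omega
                    · rw [show pturn (b - 1 + -1 * (m4 : Int), l + 0 * (m4 : Int), 3)
                          = (b - 1 + -1 * (m4 : Int), l + 0 * (m4 : Int) + 1, 0) from pturn3 _ _]
                      show Free rows cols _ ((b - 1 + -1 * (m4 : Int) : Int), (l + 0 * (m4 : Int) + 1 : Int))
                      constructor
                      · exact ⟨by omega, by omega, by omega, by omega⟩
                      · simp only [List.mem_append, mem_rayR, mem_rayD, mem_rayL, mem_rayU, hvis]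
                        push_cast
                        omega
                  · rw [ringPath_nil hinner] at hy
                    exact absurd hy (by simp)
              · -- junction: bottom row to left column
                intro x y hx hy
                rcases Nat.eq_zero_or_pos (b - t - 1).toNat with hz | hz
                · rw [hz] at hy
                  rw [show (ray (b - 1) l (-1) 0 3 0 ++ ringPath (t + 1) (b - 1) (l + 1) (r - 1))
                      = ringPath (t + 1) (b - 1) (l + 1) (r - 1) from rfl] at hy
                  rw [ringPath_nil (by omega)] at hy
                  exact absurd hy (by simp)
                · obtain ⟨m4, hm4⟩ : ∃ m, (b - t - 1).toNat = m + 1 := ⟨(b - t - 2).toNat, by omega⟩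
                  rw [hm4] at hy
                  rw [show ray (b - 1) l (-1) 0 3 (m4 + 1) = (b - 1, l, 3) :: ray (b - 1 + -1) (l + 0) (-1) 0 3 m4 from rfl,
                    List.cons_append, List.head?_cons] at hy
                  obtain rfl := Option.some.inj hy
                  rw [ray_getLast] at hx
                  obtain rfl := Option.some.inj hx
                  right
                  refine ⟨?_, ?_, ?_⟩
                  · rw [show pfwd (b + 0 * (k3 : Int), r - 1 + -1 * (k3 : Int), 2)
                        = (b + 0 * (k3 : Int), r - 1 + -1 * (k3 : Int) - 1) from pfwd2 _ _]
                    intro hfree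
                    rcases Int.lt_or_le (r - 1 + -1 * (k3 : Int) - 1) 0 with hc | hc
                    · exact absurd hfree.1.2.2.1 (by omega)
                    · apply hfree.2
                      simp only [pcoords, List.mem_cons, List.mem_append, mem_rayR, mem_rayD, mem_rayL, hvis]
                      push_cast
                      omega
                  · rw [show pturn (b + 0 * (k3 : Int), r - 1 + -1 * (k3 : Int), 2)
                        = (b + 0 * (k3 : Int) - 1, r - 1 + -1 * (k3 : Int), 3) from pturn2 _ _]
                    simp only [Prod.mk.injEq, and_true]
                    omega
                  · rw [show pturn (b + 0 * (k3 : Int), r - 1 + -1 * (k3 : Int), 2)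
                        = (b + 0 * (k3 : Int) - 1, r - 1 + -1 * (k3 : Int), 3) from pturn2 _ _]
                    show Free rows cols _ ((b + 0 * (k3 : Int) - 1 : Int), (r - 1 + -1 * (k3 : Int) : Int))
                    constructor
                    · exact ⟨by omega, by omega, by omega, by omega⟩
                    · simp only [List.mem_append, mem_rayR, mem_rayD, mem_rayL, hvis]
                      push_cast
                      omega
            · -- junction: right column to bottom row
              intro x y hx hy
              rw [show ray b (r - 1) 0 (-1) 2 (k3 + 1) = (b, r - 1, 2) :: ray (b + 0) (r - 1 + -1) 0 (-1) 2 k3 from rfl,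
                List.cons_append, List.head?_cons] at hy
              obtain rfl := Option.some.inj hy
              rw [ray_getLast] at hx
              obtain rfl := Option.some.inj hx
              right
              refine ⟨?_, ?_, ?_⟩
              · rw [show pfwd (t + 1 + 1 * (k2 : Int), r + 0 * (k2 : Int), 1)
                    = (t + 1 + 1 * (k2 : Int) + 1, r + 0 * (k2 : Int)) from pfwd1 _ _]
                intro hfree
                rcases Int.lt_or_le (t + 1 + 1 * (k2 : Int) + 1) rows with hc | hc
                · apply hfree.2
                  simp only [pcoords, List.mem_cons, List.mem_append, mem_rayR, mem_rayD, hvis]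
                  push_cast
                  omega
                · exact absurd hfree.1.2.1 (by omega)
              · rw [show pturn (t + 1 + 1 * (k2 : Int), r + 0 * (k2 : Int), 1)
                    = (t + 1 + 1 * (k2 : Int), r + 0 * (k2 : Int) - 1, 2) from pturn1 _ _]
                simp only [Prod.mk.injEq, and_true]
                omega
              · rw [show pturn (t + 1 + 1 * (k2 : Int), r + 0 * (k2 : Int), 1)
                    = (t + 1 + 1 * (k2 : Int), r + 0 * (k2 : Int) - 1, 2) from pturn1 _ _]
                show Free rows cols _ ((t + 1 + 1 * (k2 : Int) : Int), (r + 0 * (k2 : Int) - 1 : Int))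
                constructor
                · exact ⟨by omega, by omega, by omega, by omega⟩
                · simp only [List.mem_append, mem_rayR, mem_rayD, hvis]
                  push_cast
                  omega
          · -- junction: top row to right column
            intro x y hx hy
            rw [show ray (t + 1) r 1 0 1 (k2 + 1) = (t + 1, r, 1) :: ray (t + 1 + 1) (r + 0) 1 0 1 k2 from rfl,
              List.cons_append, List.head?_cons] at hy
            obtain rfl := Option.some.inj hy
            rw [ray_getLast] at hx
            obtain rfl := Option.some.inj hx
            right
            refine ⟨?_, ?_, ?_⟩
            · rw [show pfwd (t + 0 * (k1 : Int), l + 1 * (k1 : Int), 0)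
                  = (t + 0 * (k1 : Int), l + 1 * (k1 : Int) + 1) from pfwd0 _ _]
              intro hfree
              rcases Int.lt_or_le (l + 1 * (k1 : Int) + 1) cols with hc | hc
              · apply hfree.2
                simp only [pcoords, List.mem_cons, List.mem_append, mem_rayR, hvis]
                push_cast
                omega
              · exact absurd hfree.1.2.2.2 (by omega)
            · rw [show pturn (t + 0 * (k1 : Int), l + 1 * (k1 : Int), 0)
                  = (t + 0 * (k1 : Int) + 1, l + 1 * (k1 : Int), 1) from pturn0 _ _]
              simp only [Prod.mk.injEq, and_true]
              omega
            · rw [show pturn (t + 0 * (k1 : Int), l + 1 * (k1 : Int), 0)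
                  = (t + 0 * (k1 : Int) + 1, l + 1 * (k1 : Int), 1) from pturn0 _ _]
              show Free rows cols _ ((t + 0 * (k1 : Int) + 1 : Int), (l + 1 * (k1 : Int) : Int))
              constructor
              · exact ⟨by omega, by omega, by omega, by omega⟩
              · simp only [List.mem_append, mem_rayR, hvis]
                push_cast
                omega
    · rw [ringPath_nil h]
      trivial

-- ===== proof machinery: the A-side machine follows any greedy path =====

lemma vget_mk (R C : Nat) (x y : Int) :
    vget (List.replicate R (List.replicate C false)) x y = false := by
  unfold vget
  simp only [List.getD_eq_getElem?_getD, List.getElem?_replicate]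
  split_ifs <;> simp

lemma vset_dims {g : List (List Bool)} {R C : Nat} (hR : g.length = R)
    (hC : ∀ row ∈ g, row.length = C) {r : Int} (c : Int)
    (hr0 : 0 ≤ r) (hr1 : r < (R : Int)) :
    (vset g r c).length = R ∧ ∀ row ∈ vset g r c, row.length = C := by
  unfold vset
  refine ⟨by simpa using hR, ?_⟩
  intro row hrow
  have hlt : r.toNat < g.length := by omega
  rcases List.mem_or_eq_of_mem_set hrow with h | h
  · exact hC _ h
  · subst h
    rw [List.getD_eq_getElem _ _ hlt]
    simpa using hC _ (List.getElem_mem hlt)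

lemma vget_vset {g : List (List Bool)} {R C : Nat} (hR : g.length = R)
    (hC : ∀ row ∈ g, row.length = C) {r c x y : Int}
    (hr : 0 ≤ r) (hr2 : r < (R : Int)) (hc : 0 ≤ c) (hc2 : c < (C : Int))
    (hx : 0 ≤ x) (hx2 : x < (R : Int)) (hy : 0 ≤ y) (hy2 : y < (C : Int)) :
    vget (vset g r c) x y = if x = r ∧ y = c then true else vget g x y := by
  unfold vget vset
  simp only [List.getD_eq_getElem?_getD]
  have hrg : r.toNat < g.length := by omega
  have hrowlen : ((g[r.toNat]?).getD []).length = C := by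
    rw [List.getElem?_eq_getElem hrg]
    exact hC _ (List.getElem_mem hrg)
  split_ifs with hcond
  · obtain ⟨hxr, hyc⟩ := hcond
    subst hxr; subst hyc
    rw [List.getElem?_set_self hrg]
    simp only [Option.getD_some]
    rw [List.getElem?_set_self (by omega)]
    rfl
  · by_cases hxr : x = r
    · subst hxr
      have hyc : y ≠ c := by tauto
      rw [List.getElem?_set_self hrg]
      simp only [Option.getD_some]
      rw [List.getElem?_set_ne (by omega : c.toNat ≠ y.toNat)]
    · rw [List.getElem?_set_ne (by omega : r.toNat ≠ x.toNat)]

lemma walk (matrix : List (List Int)) (rows cols : Int)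
    (hrc : rows = (rows.toNat : Int)) (hcc : cols = (cols.toNat : Int)) :
    ∀ (post : List (Int × Int × Int)) (cur : Int × Int × Int) (fuel : Nat)
      (visited : List (List Bool)) (seq : List Int) (pvis : List (Int × Int)),
    post.length + 1 ≤ fuel →
    visited.length = rows.toNat → (∀ row ∈ visited, row.length = cols.toNat) →
    (∀ x y, 0 ≤ x → x < rows → 0 ≤ y → y < cols →
      (vget visited x y = true ↔ (x, y) ∈ pvis)) →
    Inb rows cols (pcoords cur) → pcoords cur ∉ pvis →
    ((seq.length : Int) + ((post.length : Int) + 1) = rows * cols) →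
    GP rows cols pvis (cur :: post) →
    loopA matrix rows cols fuel visited seq [(cur.1, cur.2.1, cur.2.2, 1)]
      = seq ++ (cur :: post).map (fun p => getm matrix p.1 p.2.1) := by
  intro post
  induction post with
  | nil =>
    intro cur fuel visited seq pvis hfuel hR hC hvis hinb hfresh hlen hgp
    obtain ⟨f, rfl⟩ : ∃ f, fuel = f + 1 := ⟨fuel - 1, by omega⟩
    obtain ⟨r, c, d⟩ := cur
    have hb1 : 0 ≤ r := hinb.1
    have hb2 : r < rows := hinb.2.1
    have hb3 : 0 ≤ c := hinb.2.2.1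
    have hb4 : c < cols := hinb.2.2.2
    have hfr : (r, c) ∉ pvis := hfresh
    have hv0 : vget visited r c = false := by
      rcases Bool.eq_false_or_eq_true (vget visited r c) with h | h
      · exact absurd ((hvis r c hb1 hb2 hb3 hb4).1 h) hfr
      · exact h
    simp only [List.length_nil] at hlen
    simp only [loopA]
    rw [if_neg (by push_neg; exact ⟨by omega, by omega, by omega, by omega, by simp [hv0]⟩)]
    rw [if_pos (by simp only [List.length_append, List.length_cons, List.length_nil]; push_cast; push_cast at hlen; omega)]
    simp
  | cons p post ih =>
    intro cur fuel visited seq pvis hfuel hR hC hvis hinb hfresh hlen hgp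
    obtain ⟨f, rfl⟩ : ∃ f, fuel = f + 1 := ⟨fuel - 1, by omega⟩
    obtain ⟨r, c, d⟩ := cur
    have hb1 : 0 ≤ r := hinb.1
    have hb2 : r < rows := hinb.2.1
    have hb3 : 0 ≤ c := hinb.2.2.1
    have hb4 : c < cols := hinb.2.2.2
    have hfr : (r, c) ∉ pvis := hfresh
    obtain ⟨hstep, hgp'⟩ := hgp
    have hv0 : vget visited r c = false := by
      rcases Bool.eq_false_or_eq_true (vget visited r c) with h | h
      · exact absurd ((hvis r c hb1 hb2 hb3 hb4).1 h) hfr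
      · exact h
    have hdims' := vset_dims hR hC (r := r) c (by omega) (by omega)
    have hvis' : ∀ x y, 0 ≤ x → x < rows → 0 ≤ y → y < cols →
        (vget (vset visited r c) x y = true ↔ (x, y) ∈ ((r, c) :: pvis)) := by
      intro x y p1 p2 p3 p4
      rw [vget_vset hR hC (by omega) (by omega) (by omega) (by omega)
        (by omega) (by omega) (by omega) (by omega)]
      constructor
      · intro h
        split_ifs at h with hc
        · simp [hc.1, hc.2]
        · simp only [List.mem_cons]
          exact Or.inr ((hvis x y p1 p2 p3 p4).1 h)
      · intro h
        rcases List.mem_cons.1 h with h | h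
        · rw [if_pos (by rw [Prod.ext_iff] at h; exact ⟨h.1, h.2⟩)]
        · split_ifs with hc
          · rfl
          · exact (hvis x y p1 p2 p3 p4).2 h
    simp only [List.length_cons] at hlen hfuel
    have hlen' : (((seq ++ [getm matrix r c]).length : Int) + ((post.length : Int) + 1)) = rows * cols := by
      simp only [List.length_append, List.length_cons, List.length_nil]
      push_cast
      push_cast at hlen
      omega
    have hfuel' : post.length + 1 ≤ f := by omega
    have hcond : ∀ q : Int × Int, Inb rows cols q →
        (vget (vset visited r c) q.1 q.2 = false ↔ q ∉ ((r, c) :: pvis)) := by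
      intro q hq
      have hiff : vget (vset visited r c) q.1 q.2 = true ↔ q ∈ ((r, c) :: pvis) := by
        simpa using hvis' q.1 q.2 hq.1 hq.2.1 hq.2.2.1 hq.2.2.2
      constructor
      · intro h hm
        rw [hiff.2 hm] at h
        exact absurd h (by simp)
      · intro hm
        rcases Bool.eq_false_or_eq_true (vget (vset visited r c) q.1 q.2) with h | h
        · exact absurd (hiff.1 h) hm
        · exact h
    simp only [loopA]
    rw [if_neg (by push_neg; exact ⟨by omega, by omega, by omega, by omega, by simp [hv0]⟩)]
    rw [if_neg (by simp only [List.length_append, List.length_cons, List.length_nil]; push_cast; push_cast at hlen; omega)]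
    rcases hstep with ⟨hfree, hpeq⟩ | ⟨hnfree, hpeq, hfree2⟩
    · -- straight move: the first push is taken
      have hq : pfwd (r, c, d) = (r + (dirAt d).1 * 1, c + (dirAt d).2 * 1) := by
        unfold pfwd; simp
      have hf1 : Inb rows cols (r + (dirAt d).1 * 1, c + (dirAt d).2 * 1) := by
        rw [← hq]; exact hfree.1
      have hf2 : (r + (dirAt d).1 * 1, c + (dirAt d).2 * 1) ∉ ((r, c) :: pvis) := by
        have h2 := hfree.2; rw [hq] at h2; simpa [pcoords] using h2
      rw [if_pos ⟨hf1.1, hf1.2.1, hf1.2.2.1, hf1.2.2.2, (hcond _ hf1).2 hf2⟩]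
      have hcur' : p = (r + (dirAt d).1 * 1, c + (dirAt d).2 * 1, d) := by
        rw [hpeq, hq]
      subst hcur'
      have hrec := ih (r + (dirAt d).1 * 1, c + (dirAt d).2 * 1, d) f (vset visited r c)
        (seq ++ [getm matrix r c]) ((r, c) :: pvis) hfuel' hdims'.1 hdims'.2 hvis'
        (by exact hf1) (by simpa [pcoords] using hf2) hlen' hgp'
      exact hrec.trans (by simp)
    · -- blocked: turn clockwise, second push is taken
      have hq : pfwd (r, c, d) = (r + (dirAt d).1 * 1, c + (dirAt d).2 * 1) := by
        unfold pfwd; simp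
      have hnc : ¬ (0 ≤ r + (dirAt d).1 * 1 ∧ r + (dirAt d).1 * 1 < rows ∧ 0 ≤ c + (dirAt d).2 * 1 ∧ c + (dirAt d).2 * 1 < cols ∧ vget (vset visited r c) (r + (dirAt d).1 * 1) (c + (dirAt d).2 * 1) = false) := by
        intro hcnd
        apply hnfree
        rw [hq]
        exact ⟨⟨hcnd.1, hcnd.2.1, hcnd.2.2.1, hcnd.2.2.2.1⟩, (hcond _ ⟨hcnd.1, hcnd.2.1, hcnd.2.2.1, hcnd.2.2.2.1⟩).1 hcnd.2.2.2.2⟩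
      rw [if_neg hnc]
      have hqt : pturn (r, c, d) = (r + (dirAt (PySem.Int.mod (d + 1) 4)).1 * 1,
          c + (dirAt (PySem.Int.mod (d + 1) 4)).2 * 1, PySem.Int.mod (d + 1) 4) := by
        unfold pturn; simp
      have hf1 : Inb rows cols (r + (dirAt (PySem.Int.mod (d + 1) 4)).1 * 1,
          c + (dirAt (PySem.Int.mod (d + 1) 4)).2 * 1) := by
        have h2 := hfree2.1
        rw [hqt] at h2
        simpa [pcoords] using h2
      have hf2 : (r + (dirAt (PySem.Int.mod (d + 1) 4)).1 * 1,
          c + (dirAt (PySem.Int.mod (d + 1) 4)).2 * 1) ∉ ((r, c) :: pvis) := by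
        have h2 := hfree2.2
        rw [hqt] at h2
        simpa [pcoords] using h2
      rw [if_pos ⟨hf1.1, hf1.2.1, hf1.2.2.1, hf1.2.2.2, (hcond _ hf1).2 hf2⟩]
      have hcur' : p = (r + (dirAt (PySem.Int.mod (d + 1) 4)).1 * 1,
          c + (dirAt (PySem.Int.mod (d + 1) 4)).2 * 1, PySem.Int.mod (d + 1) 4) := by
        rw [hpeq, hqt]
      subst hcur'
      have hrec := ih _ f (vset visited r c)
        (seq ++ [getm matrix r c]) ((r, c) :: pvis) hfuel' hdims'.1 hdims'.2 hvis'
        (by exact hf1) (by simpa [pcoords] using hf2) hlen' hgp'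
      exact hrec.trans (by simp)

-- ===== proof machinery: the B-side loop produces the same path values =====

lemma foldl_append_map {α β : Type} (f : α → β) :
    ∀ (l : List α) (acc : List β), l.foldl (fun a x => a ++ [f x]) acc = acc ++ l.map f := by
  intro l
  induction l with
  | nil => intro acc; simp
  | cons h t ih => intro acc; simp [ih]

lemma rayR_vals (matrix : List (List Int)) : ∀ (n : Nat) (t l : Int),
    (ray t l 0 1 0 n).map (fun p => getm matrix p.1 p.2.1)
      = (PySem.List.pyRange l (l + n) 1).map (fun c => getm matrix t c) := by
  intro n
  induction n with
  | zero => intro t l; rw [PySem.List.pyRange_one_eq_nil (by omega)]; rfl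
  | succ k ih =>
    intro t l
    rw [PySem.List.pyRange_one_cons (by push_cast; omega)]
    show getm matrix t l :: (ray (t + 0) (l + 1) 0 1 0 k).map _ = _
    simp only [add_zero, List.map_cons]
    rw [ih t (l + 1)]
    push_cast
    ring_nf

lemma rayD_vals (matrix : List (List Int)) : ∀ (n : Nat) (r c : Int),
    (ray r c 1 0 1 n).map (fun p => getm matrix p.1 p.2.1)
      = (PySem.List.pyRange r (r + n) 1).map (fun x => getm matrix x c) := by
  intro n
  induction n with
  | zero => intro r c; rw [PySem.List.pyRange_one_eq_nil (by omega)]; rfl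
  | succ k ih =>
    intro r c
    rw [PySem.List.pyRange_one_cons (by push_cast; omega)]
    show getm matrix r c :: (ray (r + 1) (c + 0) 1 0 1 k).map _ = _
    simp only [add_zero, List.map_cons]
    rw [ih (r + 1) c]
    push_cast
    ring_nf

lemma rayL_vals (matrix : List (List Int)) : ∀ (n : Nat) (b c : Int),
    (ray b c 0 (-1) 2 n).map (fun p => getm matrix p.1 p.2.1)
      = (PySem.List.pyRange c (c - n) (-1)).map (fun cc => getm matrix b cc) := by
  intro n
  induction n with
  | zero => intro b c; rw [PySem.List.pyRange_neg_one_eq_nil (by omega)]; rfl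
  | succ k ih =>
    intro b c
    rw [PySem.List.pyRange_neg_one_cons (by push_cast; omega)]
    show getm matrix b c :: (ray (b + 0) (c + -1) 0 (-1) 2 k).map _ = _
    simp only [add_zero, List.map_cons]
    rw [show c + (-1 : Int) = c - 1 by ring, ih b (c - 1)]
    push_cast
    ring_nf

lemma rayU_vals (matrix : List (List Int)) : ∀ (n : Nat) (r c : Int),
    (ray r c (-1) 0 3 n).map (fun p => getm matrix p.1 p.2.1)
      = (PySem.List.pyRange r (r - n) (-1)).map (fun x => getm matrix x c) := by
  intro n
  induction n with
  | zero => intro r c; rw [PySem.List.pyRange_neg_one_eq_nil (by omega)]; rfl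
  | succ k ih =>
    intro r c
    rw [PySem.List.pyRange_neg_one_cons (by push_cast; omega)]
    show getm matrix r c :: (ray (r + -1) (c + 0) (-1) 0 3 k).map _ = _
    simp only [add_zero, List.map_cons]
    rw [show r + (-1 : Int) = r - 1 by ring, ih (r - 1) c]
    push_cast
    ring_nf

lemma loopB_eq (matrix : List (List Int)) : ∀ (N : Nat) (t b l r : Int) (acc : List Int),
    (b + 1 - t).toNat ≤ N →
    loopB matrix t b l r acc = acc ++ (ringPath t b l r).map (fun p => getm matrix p.1 p.2.1) := by
  intro N
  induction N with
  | zero =>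
    intro t b l r acc hN
    rw [loopB, dif_neg (by omega), ringPath_nil (by omega)]
    simp
  | succ N ih =>
    intro t b l r acc hN
    by_cases h : t ≤ b ∧ l ≤ r
    · rw [loopB, dif_pos h]
      simp only [foldl_append_map]
      rw [ringPath, dif_pos h]
      rw [ih (t + 1) (b - 1) (l + 1) (r - 1) _ (by omega)]
      by_cases h1 : t = b
      · -- single row ring
        rw [if_pos h1, if_neg (show ¬ t < b by omega)]
        rw [PySem.List.pyRange_one_eq_nil (show b + 1 ≤ t + 1 by omega)]
        rw [PySem.List.pyRange_neg_one_eq_nil (show b - 1 ≤ t by omega)]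
        rw [ringPath_nil (by omega)]
        rw [rayR_vals matrix _ t l, show l + (((r - l + 1).toNat : Nat) : Int) = r + 1 by omega]
        simp
      · by_cases h2 : l = r
        · -- single column ring
          subst h2
          rw [if_neg h1, if_pos rfl, if_pos (show t < b by omega), if_neg (show ¬ l < l by omega)]
          rw [PySem.List.pyRange_neg_one_eq_nil (show l - 1 ≤ l - 1 by omega)]
          rw [ringPath_nil (by omega)]
          rw [show PySem.List.pyRange l (l + 1) 1 = [l] from PySem.List.pyRange_one_singleton l]
          rw [show ((t, l, 0) :: ray (t + 1) l 1 0 1 (b - t).toNat).map (fun p => getm matrix p.1 p.2.1)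
                = getm matrix t l :: (ray (t + 1) l 1 0 1 (b - t).toNat).map (fun p => getm matrix p.1 p.2.1)
              from List.map_cons]
          rw [rayD_vals matrix _ (t + 1) l, show t + 1 + (((b - t).toNat : Nat) : Int) = b + 1 by omega]
          simp
        · -- full ring
          rw [if_neg h1, if_neg h2, if_pos (show t < b by omega), if_pos (show l < r by omega)]
          simp only [List.map_append]
          rw [rayR_vals matrix _ t l, show l + (((r - l + 1).toNat : Nat) : Int) = r + 1 by omega]
          rw [rayD_vals matrix _ (t + 1) r, show t + 1 + (((b - t).toNat : Nat) : Int) = b + 1 by omega]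
          rw [rayL_vals matrix _ b (r - 1), show r - 1 - (((r - l).toNat : Nat) : Int) = l - 1 by omega]
          rw [rayU_vals matrix _ (b - 1) l, show b - 1 - (((b - t - 1).toNat : Nat) : Int) = t by omega]
          simp [List.append_assoc]
    · rw [loopB, dif_neg h, ringPath_nil h]
      simp

theorem main_equiv : ∀ (matrix : List (List Int)),
    divide_and_discover matrix = divide_and_discover_alt matrix := by
  intro matrix
  by_cases hnil : matrix = [] ∨ matrix.headD [] = []
  · rw [divide_and_discover, if_pos hnil, divide_and_discover_alt, if_pos hnil]
  · rw [divide_and_discover, if_neg hnil, divide_and_discover_alt, if_neg hnil]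
    push_neg at hnil
    have hrow : 1 ≤ (matrix.length : Int) := by
      rcases matrix with _ | _
      · exact absurd rfl hnil.1
      · simp
    have hcol : 1 ≤ ((matrix.headD []).length : Int) := by
      rcases hh : matrix.headD [] with _ | _
      · exact absurd hh hnil.2
      · simp
    have hB := loopB_eq matrix (((matrix.length : Int) - 1 + 1 - 0).toNat) 0
      ((matrix.length : Int) - 1) 0 (((matrix.headD []).length : Int) - 1) [] (le_refl _)
    rw [hB]
    have hhead := ringPath_head (t := 0) (b := (matrix.length : Int) - 1) (l := 0)
      (r := ((matrix.headD []).length : Int) - 1) ⟨by omega, by omega⟩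
    have hlenp := ringPath_length (((matrix.length : Int) - 1 + 1 - 0).toNat) 0
      ((matrix.length : Int) - 1) 0 (((matrix.headD []).length : Int) - 1) (le_refl _)
    rcases hpath : ringPath 0 ((matrix.length : Int) - 1) 0 (((matrix.headD []).length : Int) - 1)
      with _ | ⟨cur, post⟩
    · rw [hpath] at hhead
      exact absurd hhead (by simp)
    · rw [hpath] at hhead hlenp
      rw [show ((matrix.length : Int) - 1 + 1 - 0) = (matrix.length : Int) from by ring,
        show (((matrix.headD []).length : Int) - 1 + 1 - 0) = ((matrix.headD []).length : Int) from by ring,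
        Int.toNat_natCast, Int.toNat_natCast] at hlenp
      have hcur : cur = (0, 0, 0) := by
        simp only [List.head?_cons] at hhead
        exact Option.some.inj hhead
      subst hcur
      have hgp := gp_ring ((matrix.length : Int).toNat) 0 ((matrix.length : Int) - 1) 0
        (((matrix.headD []).length : Int) - 1) (matrix.length : Int)
        ((matrix.headD []).length : Int) [] (by omega) (by omega) (by omega) (by omega) (by omega)
        (by intro x y; simp; omega)
      rw [hpath] at hgp
      have hw := walk matrix (matrix.length : Int) ((matrix.headD []).length : Int)
        (by omega) (by omega) post (0, 0, 0)
        ((matrix.length : Int).toNat * ((matrix.headD []).length : Int).toNat + 1)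
        (List.replicate (matrix.length : Int).toNat
          (List.replicate ((matrix.headD []).length : Int).toNat false)) [] []
        (by simp only [List.length_cons, Int.toNat_natCast] at hlenp ⊢; omega)
        (by simp)
        (by intro row hr; rw [List.eq_of_mem_replicate hr]; simp)
        (by intro x y _ _ _ _; rw [vget_mk]; simp)
        (by show Inb _ _ ((0 : Int), (0 : Int)); exact ⟨le_refl 0, by omega, le_refl 0, by omega⟩)
        (by simp)
        (by
          simp only [List.length_nil, List.length_cons] at hlenp ⊢
          push_cast at hlenp ⊢
          omega)
        hgp
      simp only [Int.toNat_natCast] at hw ⊢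
      rw [hw]

-- ===== VERDICT (by name: the statement is the Claim_ definition above) =====
theorem divide_and_discover_spec : Claim_equal_divide_and_discover := by
  intro matrix _ _
  unfold Spec_divide_and_discover
  exact main_equiv matrix
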